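-- pv_equiv track=rewrite | github.com/arkodasgupta0412/Python-lite-Compiler | streamlit_app.py | extract_primary_issue
-- ===== SOURCE A (Python) =====
-- def extract_primary_issue(run_log: str) -> str:
--     if not run_log.strip():
--         return ""
--
--     prefixes = ["Lexical Error:", "Parse Error:", "Semantic Error:", "Error:"]
--     for line in run_log.splitlines():
--         stripped = line.strip()
--         for prefix in prefixes:
--             if stripped.startswith(prefix):
--                 return stripped
--
--     for line in run_log.splitlines():
--         stripped = line.strip()
--         if stripped:
--             return stripped
--     return ""
-- ===== SOURCE B (Python) =====
-- def extract_primary_issue(run_log: str) -> str: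
--     fallback = None
--     for line in run_log.splitlines():
--         stripped = line.strip()
--         if stripped.startswith(("Lexical Error:", "Parse Error:", "Semantic Error:", "Error:")):
--             return stripped
--         if fallback is None and stripped:
--             fallback = stripped
--     return fallback if fallback is not None else ""
-- ===== Notes on version B (the rewrite author's own statement) =====
-- stated objective: simpler
-- what changed: B replaces A's emptiness guard plus two full scans of the split lines (one for error lines, one for the first non-empty line) with a single pass that returns an error line on sight and records the first non-empty line as a fallback.
import Mathlib
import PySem

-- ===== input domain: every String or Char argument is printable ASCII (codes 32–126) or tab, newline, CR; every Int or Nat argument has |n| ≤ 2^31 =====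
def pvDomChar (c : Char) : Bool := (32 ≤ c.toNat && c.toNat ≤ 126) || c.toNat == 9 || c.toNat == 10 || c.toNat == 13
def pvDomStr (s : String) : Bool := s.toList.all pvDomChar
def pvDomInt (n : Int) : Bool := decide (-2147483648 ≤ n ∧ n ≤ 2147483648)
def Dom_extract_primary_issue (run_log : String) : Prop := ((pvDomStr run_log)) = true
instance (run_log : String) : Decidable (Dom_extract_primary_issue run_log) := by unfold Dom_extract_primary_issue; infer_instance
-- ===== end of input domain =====

-- B replaces A's emptiness guard and two full scans of the split lines with a single
-- pass that returns an error line on sight and records the first non-empty line as a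
-- fallback (objective: simpler).

def pvPrefixes : List String := ["Lexical Error:", "Parse Error:", "Semantic Error:", "Error:"]

-- ===== PORT A =====
-- first loop: return the first stripped line that starts with one of the prefixes
def pvAFindError : List String → Option String
  | [] => none
  | line :: rest =>
    let stripped := PySem.Str.strip line
    if pvPrefixes.any (fun p => PySem.Str.startswith stripped p) then some stripped
    else pvAFindError rest

-- second loop: return the first non-empty stripped line (or "")
def pvAFindNonempty : List String → String
  | [] => ""
  | line :: rest =>
    let stripped := PySem.Str.strip line
    if stripped ≠ "" then stripped else pvAFindNonempty rest

def extract_primary_issue (run_log : String) : String :=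
  if PySem.Str.strip run_log = "" then ""
  else
    match pvAFindError (PySem.Str.splitlines run_log) with
    | some s => s
    | none => pvAFindNonempty (PySem.Str.splitlines run_log)

-- ===== PORT B =====
-- single pass with a fallback accumulator (Source B's loop)
def pvBScan : List String → Option String → String
  | [], fallback => fallback.getD ""
  | line :: rest, fallback =>
    let stripped := PySem.Str.strip line
    if pvPrefixes.any (fun p => PySem.Str.startswith stripped p) then stripped
    else pvBScan rest (if fallback.isNone && stripped ≠ "" then some stripped else fallback)

def extract_primary_issue_alt (run_log : String) : String :=
  pvBScan (PySem.Str.splitlines run_log) none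

-- ===== PRECONDITION & SPEC =====
def Spec_extract_primary_issue (run_log : String) (out : String) : Prop := out = extract_primary_issue_alt run_log
instance (run_log : String) (out : String) : Decidable (Spec_extract_primary_issue run_log out) := by unfold Spec_extract_primary_issue; infer_instance

-- ===== CLAIM (what is proved, stated in full; the proofs are below) =====
def Claim_equal_extract_primary_issue : Prop := ∀ (run_log : String), Dom_extract_primary_issue run_log → Spec_extract_primary_issue run_log (extract_primary_issue run_log)

-- ===== LEMMAS AND PROOFS =====

-- the one-pass scan equals "first error line, else the fallback, else the first non-empty line"
theorem pvBScan_eq (ls : List String) (fb : Option String) :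
    pvBScan ls fb =
      match pvAFindError ls with
      | some s => s
      | none => match fb with
        | some f => f
        | none => pvAFindNonempty ls := by
  induction ls generalizing fb with
  | nil => cases fb <;> simp [pvBScan, pvAFindError, pvAFindNonempty]
  | cons line rest ih =>
    simp only [pvBScan, pvAFindError, pvAFindNonempty]
    by_cases h : (pvPrefixes.any fun p => PySem.Str.startswith (PySem.Str.strip line) p) = true
    · rw [if_pos h, if_pos h]
    · rw [if_neg h, if_neg h, ih]
      cases fb with
      | some f => simp
      | none =>
        by_cases hs : PySem.Str.strip line = "" <;> simp [hs]

-- strip s = [] forces every character of s to be whitespace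
theorem all_ws_of_strip_nil (s : List Char) (h : PySem.Chars.strip s = []) :
    ∀ c ∈ s, PySem.Chars.isspace c = true := by
  unfold PySem.Chars.strip PySem.Chars.rstrip PySem.Chars.lstrip at h
  rcases hd : List.dropWhile PySem.Chars.isspace s with _ | ⟨a, l⟩
  · exact List.dropWhile_eq_nil_iff.mp hd
  · exfalso
    rw [hd] at h
    have hrev : List.dropWhile PySem.Chars.isspace (a :: l).reverse = [] := by
      have := congrArg List.reverse h
      simpa using this
    have hall := List.dropWhile_eq_nil_iff.mp hrev
    have ha : PySem.Chars.isspace a = true := by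
      apply hall; simp
    have hfail := List.head?_dropWhile_not PySem.Chars.isspace s
    rw [hd] at hfail
    simp [ha] at hfail

-- unfolding splitlines.go at a cons that is not the start of a CRLF pair
theorem go_unfold_cons (isB : Char → Bool) (c : Char) (rest cur : List Char) (acc : List (List Char))
    (hne : ∀ (rest_1 : List Char), c = '\x0d' → rest = '\n' :: rest_1 → False) :
    PySem.Chars.splitlines.go isB (c :: rest) cur acc
    = if isB c then PySem.Chars.splitlines.go isB rest [] (cur.reverse :: acc)
      else PySem.Chars.splitlines.go isB rest (c :: cur) acc := by
  rw [PySem.Chars.splitlines.go.eq_def]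
  split
  · rename_i h; cases h
  · rename_i h; injection h with h1 h2; exact (hne _ h1 h2).elim
  · rename_i h; injection h with h1 h2; subst h1; subst h2; rfl

-- splitlines of an all-whitespace string yields only all-whitespace lines
theorem go_ws (isB : Char → Bool) (s cur : List Char) (acc : List (List Char))
    (hs : ∀ c ∈ s, PySem.Chars.isspace c = true)
    (hcur : ∀ c ∈ cur, PySem.Chars.isspace c = true)
    (hacc : ∀ l ∈ acc, ∀ c ∈ l, PySem.Chars.isspace c = true) :
    ∀ l ∈ PySem.Chars.splitlines.go isB s cur acc, ∀ c ∈ l, PySem.Chars.isspace c = true := by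
  induction s, cur, acc using PySem.Chars.splitlines.go.induct isB with
  | case1 cur acc hc =>
    intro l hl
    rw [show PySem.Chars.splitlines.go isB [] cur acc = acc.reverse from by
      rw [PySem.Chars.splitlines.go.eq_def]; simp [hc]] at hl
    exact hacc l (List.mem_reverse.mp hl)
  | case2 cur acc hc =>
    intro l hl c hcmem
    rw [show PySem.Chars.splitlines.go isB [] cur acc = (cur.reverse :: acc).reverse from by
      rw [PySem.Chars.splitlines.go.eq_def]; simp [hc]] at hl
    simp only [List.mem_reverse, List.mem_cons] at hl
    rcases hl with hl | hl
    · subst hl; exact hcur c (List.mem_reverse.mp hcmem)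
    · exact hacc l hl c hcmem
  | case3 rest cur acc ih =>
    show ∀ l ∈ PySem.Chars.splitlines.go isB ('\x0d' :: '\n' :: rest) cur acc, _
    rw [show PySem.Chars.splitlines.go isB ('\x0d' :: '\n' :: rest) cur acc
        = PySem.Chars.splitlines.go isB rest [] (cur.reverse :: acc) from rfl]
    apply ih
    · intro c hc; exact hs c (by simp [hc])
    · intro c hc; simp at hc
    · intro l hl c hc
      simp only [List.mem_cons] at hl
      rcases hl with hl | hl
      · subst hl; exact hcur c (by simpa using hc)
      · exact hacc l hl c hc
  | case4 c rest cur acc hne hb ih =>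
    rw [go_unfold_cons isB c rest cur acc hne, if_pos hb]
    apply ih
    · intro x hx; exact hs x (by simp [hx])
    · intro x hx; simp at hx
    · intro l hl x hx
      simp only [List.mem_cons] at hl
      rcases hl with hl | hl
      · subst hl; exact hcur x (by simpa using hx)
      · exact hacc l hl x hx
  | case5 c rest cur acc hne hb ih =>
    rw [go_unfold_cons isB c rest cur acc hne, if_neg hb]
    apply ih
    · intro x hx; exact hs x (by simp [hx])
    · intro x hx
      simp only [List.mem_cons] at hx
      rcases hx with hx | hx
      · subst hx; exact hs x (by simp)
      · exact hcur x hx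
    · exact hacc

theorem strip_nil_of_all_ws (l : List Char) (h : ∀ c ∈ l, PySem.Chars.isspace c = true) :
    PySem.Chars.strip l = [] := by
  unfold PySem.Chars.strip PySem.Chars.lstrip PySem.Chars.rstrip
  have h1 : List.dropWhile PySem.Chars.isspace l = [] := List.dropWhile_eq_nil_iff.mpr h
  simp [h1]

-- if the whole log strips to "", every line of splitlines strips to ""
theorem strip_lines_empty (run_log : String) (h : PySem.Str.strip run_log = "") :
    ∀ line ∈ PySem.Str.splitlines run_log, PySem.Str.strip line = "" := by
  intro line hline
  have hws : ∀ c ∈ run_log.toList, PySem.Chars.isspace c = true := by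
    apply all_ws_of_strip_nil
    have := congrArg String.toList h
    simpa [PySem.Str.strip] using this
  simp only [PySem.Str.splitlines, List.mem_map] at hline
  obtain ⟨l, hl, rfl⟩ := hline
  have hlw : ∀ c ∈ l, PySem.Chars.isspace c = true := by
    unfold PySem.Chars.splitlines at hl
    exact go_ws _ _ _ _ hws (by simp) (by simp) l hl
  have : PySem.Chars.strip l = [] := strip_nil_of_all_ws l hlw
  simp [PySem.Str.strip, this]

theorem empty_no_prefix : (pvPrefixes.any (fun p => PySem.Str.startswith "" p)) = false := by
  decide

theorem findError_none (ls : List String) (h : ∀ line ∈ ls, PySem.Str.strip line = "") :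
    pvAFindError ls = none := by
  induction ls with
  | nil => rfl
  | cons line rest ih =>
    have h0 : PySem.Str.strip line = "" := h line (by simp)
    simp only [pvAFindError, h0, empty_no_prefix]
    simp only [Bool.false_eq_true, if_false]
    exact ih (fun l hl => h l (by simp [hl]))

theorem findNonempty_empty (ls : List String) (h : ∀ line ∈ ls, PySem.Str.strip line = "") :
    pvAFindNonempty ls = "" := by
  induction ls with
  | nil => rfl
  | cons line rest ih =>
    have h0 : PySem.Str.strip line = "" := h line (by simp)
    simp only [pvAFindNonempty, h0, ne_eq, not_true_eq_false, if_false]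
    exact ih (fun l hl => h l (by simp [hl]))

-- ===== VERDICT (by name: the statement is the Claim_ definition above) =====
theorem extract_primary_issue_spec : Claim_equal_extract_primary_issue := by
  intro run_log _
  unfold Spec_extract_primary_issue extract_primary_issue extract_primary_issue_alt
  rw [pvBScan_eq]
  by_cases h : PySem.Str.strip run_log = ""
  · have hlines := strip_lines_empty run_log h
    rw [findError_none _ hlines, findNonempty_empty _ hlines]
    simp [h]
  · simp only [h, if_false]
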